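-- pv_equiv track=rewrite | github.com/parthib22/my-CP-reserve | [Q] LargestSubsquareSurroundedbyX.py | largestSubsquare
-- ===== SOURCE A (Python) =====
-- def largestSubsquare(n, a):
--     # Initialize matrices for top and left counts
--     top = [[0 for _ in range(n)] for _ in range(n)]
--     left = [[0 for _ in range(n)] for _ in range(n)]
--
--     # Compute top metric
--     for i in range(n):
--         for j in range(n):
--             if a[i][j] == "X":
--                 top[i][j] = 1 if i == 0 else top[i - 1][j] + 1
--
--     # Compute left metric
--     for i in range(n):
--         for j in range(n):
--             if a[i][j] == "X":
--                 left[i][j] = 1 if j == 0 else left[i][j - 1] + 1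
--
--     # Finding the largest subsquare
--     maxSubSq = 0
--     for i in range(n):
--         for j in range(n):
--             if top[i][j] == 0 or left[i][j] == 0:
--                 continue
--
--             currentValue = min(top[i][j], left[i][j])
--
--             while currentValue > 0:
--                 top1 = i - currentValue + 1
--                 left1 = j - currentValue + 1
--
--                 if left[top1][j] >= currentValue and top[i][left1] >= currentValue:
--                     maxSubSq = max(maxSubSq, currentValue)
--                     break
--
--                 currentValue -= 1
--
--     return maxSubSq
-- ===== SOURCE B (Python) =====
-- def largestSubsquare(n, a):
--     # Search sizes from largest to smallest; return the first size whose
--     # square border (checked directly cell by cell) is all "X".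
--     def border_ok(i, j, k):
--         return (all(a[i][j + t] == "X" for t in range(k))
--                 and all(a[i + k - 1][j + t] == "X" for t in range(k))
--                 and all(a[i + t][j] == "X" for t in range(k))
--                 and all(a[i + t][j + k - 1] == "X" for t in range(k)))
--     for k in range(n, 0, -1):
--         for i in range(n - k + 1):
--             for j in range(n - k + 1):
--                 if border_ok(i, j, k):
--                     return k
--     return 0
-- ===== Notes on version B (the rewrite author's own statement) =====
-- stated objective: simpler
-- what changed: Replaces A's two run-length DP tables (top/left) plus a per-cell descending while-loop anchored at bottom-right corners with a single direct descending search over border sizes that checks each candidate square's border cell by cell and returns at the first (largest) hit.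
import Mathlib
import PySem

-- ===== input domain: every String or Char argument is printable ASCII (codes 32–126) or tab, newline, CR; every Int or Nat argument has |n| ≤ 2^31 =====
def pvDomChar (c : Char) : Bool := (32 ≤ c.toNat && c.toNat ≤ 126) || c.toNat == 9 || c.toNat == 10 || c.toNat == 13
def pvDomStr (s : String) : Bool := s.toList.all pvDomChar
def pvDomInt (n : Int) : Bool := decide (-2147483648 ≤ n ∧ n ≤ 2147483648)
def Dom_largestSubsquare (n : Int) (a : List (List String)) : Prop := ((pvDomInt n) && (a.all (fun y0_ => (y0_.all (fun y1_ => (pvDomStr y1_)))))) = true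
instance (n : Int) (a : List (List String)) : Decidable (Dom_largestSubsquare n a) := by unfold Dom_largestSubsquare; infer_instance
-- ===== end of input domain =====

-- B replaces A's two run-length DP tables and per-cell descending while-loop by a direct
-- descending search over border sizes with a cell-by-cell border check (objective: simpler).

-- ===== PORT A =====

-- a[i][j] (indices are loop counters, always ≥ 0 and in range on Pre_-admitted inputs)
def pvCell (a : List (List String)) (i j : Int) : String :=
  PySem.List.pyGetD (PySem.List.pyGetD a i []) j ""

-- m[i][j] for the Int matrices
def pvMget (m : List (List Int)) (i j : Int) : Int :=
  PySem.List.pyGetD (PySem.List.pyGetD m i []) j 0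

-- m[i][j] = v (i, j come from range(n), hence ≥ 0: toNat is exact)
def pvMset (m : List (List Int)) (i j : Int) (v : Int) : List (List Int) :=
  m.set i.toNat ((PySem.List.pyGetD m i []).set j.toNat v)

-- the shared shape of A's two table-filling double loops ('top' and 'left' differ only in
-- the assigned expression f): zero matrix, then for i in range(n): for j in range(n): …
def pvTable (n : Int) (a : List (List String))
    (f : List (List Int) → Int → Int → Int) : List (List Int) :=
  (PySem.List.pyRange 0 n).foldl
    (fun m i => (PySem.List.pyRange 0 n).foldl
      (fun m j => if pvCell a i j = "X" then pvMset m i j (f m i j) else m) m)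
    ((PySem.List.pyRange 0 n).map (fun _ => (PySem.List.pyRange 0 n).map (fun _ => (0 : Int))))

-- A's while loop: try currentValue, …, 1; on success max/break, else decrement
def pvWhile (top left : List (List Int)) (i j acc c : Int) : Int :=
  if 0 < c then
    if c ≤ pvMget left (i - c + 1) j ∧ c ≤ pvMget top i (j - c + 1) then max acc c
    else pvWhile top left i j acc (c - 1)
  else acc
termination_by c.toNat
decreasing_by omega

def largestSubsquare (n : Int) (a : List (List String)) : Int :=
  let top := pvTable n a (fun m i j => if i = 0 then 1 else pvMget m (i - 1) j + 1)
  let left := pvTable n a (fun m i j => if j = 0 then 1 else pvMget m i (j - 1) + 1)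
  (PySem.List.pyRange 0 n).foldl
    (fun acc i => (PySem.List.pyRange 0 n).foldl
      (fun acc j =>
        if pvMget top i j = 0 ∨ pvMget left i j = 0 then acc
        else pvWhile top left i j acc (min (pvMget top i j) (pvMget left i j)))
      acc)
    0

-- ===== PORT B =====

-- border_ok(i, j, k): the four border segments of the k×k square with top-left (i, j)
def pvBorderOk (a : List (List String)) (i j k : Int) : Bool :=
  (PySem.List.pyRange 0 k).all (fun t => pvCell a i (j + t) = "X") &&
  (PySem.List.pyRange 0 k).all (fun t => pvCell a (i + k - 1) (j + t) = "X") &&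
  (PySem.List.pyRange 0 k).all (fun t => pvCell a (i + t) j = "X") &&
  (PySem.List.pyRange 0 k).all (fun t => pvCell a (i + t) (j + k - 1) = "X")

-- for k in range(n, 0, -1): for i …: for j …: if border_ok: return k — then return 0
def pvSearch (n : Int) (a : List (List String)) : List Int → Int
  | [] => 0
  | k :: ks =>
    if (PySem.List.pyRange 0 (n - k + 1)).any
        (fun i => (PySem.List.pyRange 0 (n - k + 1)).any (fun j => pvBorderOk a i j k))
    then k else pvSearch n a ks

def largestSubsquare_alt (n : Int) (a : List (List String)) : Int :=
  pvSearch n a (PySem.List.pyRange n 0 (-1))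

-- ===== PRECONDITION & SPEC =====
-- Pre_ excludes exactly the inputs where Python A raises IndexError: when n > 0 the grid
-- must have at least n rows whose first n each have at least n entries.
def Pre_largestSubsquare (n : Int) (a : List (List String)) : Prop :=
  0 < n → (n.toNat ≤ a.length ∧ ∀ r ∈ a.take n.toNat, n.toNat ≤ r.length)
instance (n : Int) (a : List (List String)) : Decidable (Pre_largestSubsquare n a) := by
  unfold Pre_largestSubsquare; infer_instance

def pvWitness_largestSubsquare : Int × List (List String) :=
  (2, [["X", "X"], ["X", "X"]])

def Spec_largestSubsquare (n : Int) (a : List (List String)) (out : Int) : Prop := out = largestSubsquare_alt n a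
instance (n : Int) (a : List (List String)) (out : Int) : Decidable (Spec_largestSubsquare n a out) := by unfold Spec_largestSubsquare; infer_instance

-- ===== CLAIM (what is proved, stated in full; the proofs are below) =====
def Claim_equal_largestSubsquare : Prop := ∀ (n : Int) (a : List (List String)), Dom_largestSubsquare n a → Pre_largestSubsquare n a → Spec_largestSubsquare n a (largestSubsquare n a)

-- ===== LEMMAS AND PROOFS =====

-- cell (i, j) is "X" (Nat coordinates; same out-of-range defaults as the ports)
def pvXb (a : List (List String)) (i j : Nat) : Bool := (a.getD i []).getD j "" == "X"

-- run length of trues of g ending at index i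
def pvRunF (g : Nat → Bool) : Nat → Int
  | 0 => if g 0 then 1 else 0
  | i + 1 => if g (i + 1) then pvRunF g i + 1 else 0

def pvTopV (a : List (List String)) (i j : Nat) : Int := pvRunF (fun r => pvXb a r j) i
def pvLeftV (a : List (List String)) (i j : Nat) : Int := pvRunF (fun c => pvXb a i c) j

-- full table of values F and its in-construction partial state (rows < i done, row i done below j)
def pvTblM (F : Nat → Nat → Int) (n' : Nat) : List (List Int) :=
  (List.range n').map (fun i => (List.range n').map (fun j => F i j))
def pvTblP (F : Nat → Nat → Int) (n' i j : Nat) : List (List Int) :=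
  (List.range n').map (fun r => (List.range n').map
    (fun c => if r < i ∨ (r = i ∧ c < j) then F r c else 0))

-- border predicates: square of size k with top-left (p, q) / bottom-right (i, j)
def pvBorderTLb (a : List (List String)) (p q k : Nat) : Bool :=
  (List.range k).all (fun t => pvXb a p (q + t)) &&
  (List.range k).all (fun t => pvXb a (p + k - 1) (q + t)) &&
  (List.range k).all (fun t => pvXb a (p + t) q) &&
  (List.range k).all (fun t => pvXb a (p + t) (q + k - 1))

def pvBorderBRb (a : List (List String)) (i j k : Nat) : Bool :=
  decide (k ≤ i + 1) && decide (k ≤ j + 1) &&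
  (List.range k).all (fun t =>
    pvXb a (i - t) j && pvXb a i (j - t) && pvXb a (i - (k - 1)) (j - t) && pvXb a (i - t) (j - (k - 1)))

def pvOkK (a : List (List String)) (n' k : Nat) : Bool :=
  (List.range (n' + 1 - k)).any (fun p => (List.range (n' + 1 - k)).any (fun q => pvBorderTLb a p q k))

-- largest k' ≤ k with pvOkK, else 0
def pvBestK (a : List (List String)) (n' : Nat) : Nat → Int
  | 0 => 0
  | k + 1 => if pvOkK a n' (k + 1) then ((k : Int) + 1) else pvBestK a n' k

-- largest c' ≤ c with a bottom-right border at (i, j), else 0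
def pvGbr (a : List (List String)) (i j : Nat) : Nat → Int
  | 0 => 0
  | c + 1 => if pvBorderBRb a i j (c + 1) then ((c : Int) + 1) else pvGbr a i j c


lemma pvCell_natCast (a : List (List String)) (i j : Nat) :
    pvCell a (i : Int) (j : Int) = (a.getD i []).getD j "" := by
  simp [pvCell, PySem.List.pyGetD_natCast]

lemma pvCell_eq_X_iff (a : List (List String)) (i j : Nat) :
    (pvCell a (i : Int) (j : Int) = "X") ↔ pvXb a i j = true := by
  simp [pvCell_natCast, pvXb]

lemma pvMget_natCast (m : List (List Int)) (i j : Nat) :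
    pvMget m (i : Int) (j : Int) = (m.getD i []).getD j 0 := by
  simp [pvMget, PySem.List.pyGetD_natCast]

lemma pvTblM_get (F : Nat → Nat → Int) (n' r c : Nat) (hr : r < n') (hc : c < n') :
    pvMget (pvTblM F n') (r : Int) (c : Int) = F r c := by
  rw [pvMget_natCast, pvTblM, PySem.List.getD_map_range _ _ _ _ hr,
    PySem.List.getD_map_range _ _ _ _ hc]

lemma pvTblP_get (F : Nat → Nat → Int) (n' i j r c : Nat) (hr : r < n') (hc : c < n') :
    pvMget (pvTblP F n' i j) (r : Int) (c : Int)
      = if r < i ∨ (r = i ∧ c < j) then F r c else 0 := by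
  rw [pvMget_natCast, pvTblP, PySem.List.getD_map_range _ _ _ _ hr,
    PySem.List.getD_map_range _ _ _ _ hc]

lemma pvZeros_eq (n : Int) (F : Nat → Nat → Int) :
    ((PySem.List.pyRange 0 n).map (fun _ => (PySem.List.pyRange 0 n).map (fun _ => (0 : Int))))
      = pvTblP F n.toNat 0 0 := by
  rw [PySem.List.pyRange_zero, pvTblP, List.map_map, List.map_map]
  refine List.map_congr_left (fun r hr => ?_)
  refine List.map_congr_left (fun c hc => ?_)
  simp

lemma pvMapRangeSet {α : Type} (f : Nat → α) (n' i : Nat) (v : α) :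
    ((List.range n').map f).set i v
      = (List.range n').map (fun r => if r = i then v else f r) := by
  apply List.ext_getElem
  · simp
  · intro k hk1 hk2
    simp only [List.length_set, List.length_map, List.length_range] at hk1 hk2
    rw [List.getElem_set]
    simp only [List.getElem_map, List.getElem_range]
    split_ifs with h1 h2 h2 <;> first | rfl | omega

lemma pvMapRangeCongr {α : Type} (f g : Nat → α) (n' : Nat) (h : ∀ r, r < n' → f r = g r) :
    (List.range n').map f = (List.range n').map g :=
  List.map_congr_left (fun r hr => h r (List.mem_range.mp hr))

lemma pvMset_step (F : Nat → Nat → Int) (n' i j : Nat) (hi : i < n') (hj : j < n') :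
    pvMset (pvTblP F n' i j) (i : Int) (j : Int) (F i j) = pvTblP F n' i (j + 1) := by
  unfold pvMset
  rw [PySem.List.pyGetD_natCast, pvTblP, PySem.List.getD_map_range _ _ _ _ hi]
  simp only [Int.toNat_natCast]
  rw [pvMapRangeSet, pvMapRangeSet, pvTblP]
  refine pvMapRangeCongr _ _ _ (fun r hr => ?_)
  by_cases hri : r = i
  · subst hri
    simp only [if_pos rfl]
    refine pvMapRangeCongr _ _ _ (fun c hc => ?_)
    split_ifs <;> ((try omega) <;> (try rfl) <;> simp_all <;> omega)
  · rw [if_neg hri]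
    refine pvMapRangeCongr _ _ _ (fun c hc => ?_)
    split_ifs <;> ((try omega) <;> (try rfl) <;> simp_all <;> omega)

lemma pvTblP_skip (F : Nat → Nat → Int) (n' i j : Nat) (h : F i j = 0) :
    pvTblP F n' i j = pvTblP F n' i (j + 1) := by
  unfold pvTblP
  refine pvMapRangeCongr _ _ _ (fun r hr => ?_)
  refine pvMapRangeCongr _ _ _ (fun c hc => ?_)
  by_cases hri : r = i
  · subst hri
    by_cases hcj : c = j
    · subst hcj; split_ifs <;> simp [h] <;> omega
    · split_ifs <;> ((try omega) <;> (try rfl) <;> simp_all <;> omega)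
  · split_ifs <;> ((try omega) <;> (try rfl) <;> simp_all <;> omega)

lemma pvTblP_rowend (F : Nat → Nat → Int) (n' i : Nat) :
    pvTblP F n' i n' = pvTblP F n' (i + 1) 0 := by
  unfold pvTblP
  refine pvMapRangeCongr _ _ _ (fun r hr => ?_)
  refine pvMapRangeCongr _ _ _ (fun c hc => ?_)
  split_ifs <;> ((try omega) <;> (try rfl) <;> simp_all <;> omega)

lemma pvTblP_full (F : Nat → Nat → Int) (n' : Nat) :
    pvTblP F n' n' 0 = pvTblM F n' := by
  unfold pvTblP pvTblM
  refine pvMapRangeCongr _ _ _ (fun r hr => ?_)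
  refine pvMapRangeCongr _ _ _ (fun c hc => ?_)
  split_ifs <;> ((try omega) <;> (try rfl) <;> simp_all <;> omega)

lemma pvRunF_eq_zero (g : Nat → Bool) (i : Nat) (h : g i = false) : pvRunF g i = 0 := by
  cases i <;> simp [pvRunF, h]

lemma pvTable_eq (n : Int) (a : List (List String)) (f : List (List Int) → Int → Int → Int)
    (F : Nat → Nat → Int)
    (hf0 : ∀ i j, i < n.toNat → j < n.toNat → pvXb a i j = false → F i j = 0)
    (hf1 : ∀ i j, i < n.toNat → j < n.toNat → pvXb a i j = true →
        f (pvTblP F n.toNat i j) (i : Int) (j : Int) = F i j) :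
    pvTable n a f = pvTblM F n.toNat := by
  have inner : ∀ i, i < n.toNat → ∀ j, j ≤ n.toNat →
      ((List.range j).map (fun k : Nat => (k : Int))).foldl
        (fun m jj => if pvCell a (i : Int) jj = "X" then pvMset m (i : Int) jj (f m (i : Int) jj) else m)
        (pvTblP F n.toNat i 0) = pvTblP F n.toNat i j := by
    intro i hi j
    induction j with
    | zero => intro _; simp
    | succ j ih =>
      intro hj1
      rw [List.range_succ, List.map_append, List.foldl_append, ih (by omega)]
      simp only [List.map_cons, List.map_nil, List.foldl_cons, List.foldl_nil]
      by_cases hx : pvXb a i j = true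
      · rw [if_pos ((pvCell_eq_X_iff a i j).mpr hx), hf1 i j hi (by omega) hx,
          pvMset_step F n.toNat i j hi (by omega)]
      · rw [if_neg (fun hc => hx ((pvCell_eq_X_iff a i j).mp hc))]
        exact pvTblP_skip F n.toNat i j (hf0 i j hi (by omega) (by simpa using hx))
  have outer : ∀ i, i ≤ n.toNat →
      ((List.range i).map (fun k : Nat => (k : Int))).foldl
        (fun m ii => ((List.range n.toNat).map (fun k : Nat => (k : Int))).foldl
          (fun m jj => if pvCell a ii jj = "X" then pvMset m ii jj (f m ii jj) else m) m)
        (pvTblP F n.toNat 0 0) = pvTblP F n.toNat i 0 := by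
    intro i
    induction i with
    | zero => intro _; simp
    | succ i ih =>
      intro hi1
      rw [List.range_succ, List.map_append, List.foldl_append, ih (by omega)]
      simp only [List.map_cons, List.map_nil, List.foldl_cons, List.foldl_nil]
      rw [inner i (by omega) n.toNat (le_refl _), pvTblP_rowend]
  unfold pvTable
  rw [pvZeros_eq n F, PySem.List.pyRange_zero, outer n.toNat (le_refl _), pvTblP_full]

lemma pvTopTable (n : Int) (a : List (List String)) :
    pvTable n a (fun m i j => if i = 0 then 1 else pvMget m (i - 1) j + 1)
      = pvTblM (pvTopV a) n.toNat := by
  apply pvTable_eq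
  · intro i j hi hj hx; exact pvRunF_eq_zero _ _ hx
  · intro i j hi hj hx
    cases i with
    | zero => simp [pvTopV, pvRunF, hx]
    | succ i' =>
      rw [if_neg (by push_cast; omega : ¬(((i' + 1 : Nat) : Int) = 0))]
      have h2 : ((i' + 1 : Nat) : Int) - 1 = ((i' : Nat) : Int) := by push_cast; ring
      rw [h2, pvTblP_get (pvTopV a) n.toNat (i' + 1) j i' j (by omega) hj,
        if_pos (Or.inl (by omega))]
      simp [pvTopV, pvRunF, hx]

lemma pvLeftTable (n : Int) (a : List (List String)) :
    pvTable n a (fun m i j => if j = 0 then 1 else pvMget m i (j - 1) + 1)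
      = pvTblM (fun i j => pvLeftV a i j) n.toNat := by
  apply pvTable_eq
  · intro i j hi hj hx; exact pvRunF_eq_zero _ _ hx
  · intro i j hi hj hx
    cases j with
    | zero => simp [pvLeftV, pvRunF, hx]
    | succ j' =>
      rw [if_neg (by push_cast; omega : ¬(((j' + 1 : Nat) : Int) = 0))]
      have h2 : ((j' + 1 : Nat) : Int) - 1 = ((j' : Nat) : Int) := by push_cast; ring
      rw [h2, pvTblP_get _ n.toNat i (j' + 1) i j' hi (by omega),
        if_pos (Or.inr ⟨rfl, by omega⟩)]
      simp [pvLeftV, pvRunF, hx]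

lemma pvRunF_nonneg (g : Nat → Bool) (i : Nat) : 0 ≤ pvRunF g i := by
  induction i with
  | zero => unfold pvRunF; split_ifs <;> omega
  | succ i ih => unfold pvRunF; split_ifs <;> omega

lemma pvRunF_ge (g : Nat → Bool) (i k : Nat) (hk : 1 ≤ k) :
    ((k : Int) ≤ pvRunF g i) ↔ (k ≤ i + 1 ∧ ∀ t, t < k → g (i - t) = true) := by
  induction i generalizing k with
  | zero =>
    constructor
    · intro h
      unfold pvRunF at h
      split_ifs at h with hg
      · have hk1 : k = 1 := by omega
        subst hk1
        exact ⟨by omega, fun t ht => by interval_cases t; simpa using hg⟩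
      · omega
    · rintro ⟨h1, h2⟩
      have hk1 : k = 1 := by omega
      subst hk1
      have := h2 0 (by omega)
      simp only [Nat.sub_zero] at this
      simp [pvRunF, this]
  | succ i ih =>
    unfold pvRunF
    by_cases hg : g (i + 1) = true
    · rw [if_pos hg]
      rcases Nat.exists_eq_add_of_le hk with ⟨k', rfl⟩
      rcases Nat.eq_zero_or_pos k' with hk0 | hk1
      · subst hk0
        constructor
        · intro _
          refine ⟨by omega, fun t ht => ?_⟩
          interval_cases t
          simpa using hg
        · intro _
          have := pvRunF_nonneg g i
          push_cast; omega
      · have hiff := ih k' hk1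
        constructor
        · intro h
          have hk'le : (k' : Int) ≤ pvRunF g i := by push_cast at h ⊢; omega
          obtain ⟨hb, hall⟩ := hiff.mp hk'le
          refine ⟨by omega, fun t ht => ?_⟩
          cases t with
          | zero => simpa using hg
          | succ t' =>
            have : i + 1 - (t' + 1) = i - t' := by omega
            rw [this]
            exact hall t' (by omega)
        · rintro ⟨hb, hall⟩
          have : (k' : Int) ≤ pvRunF g i := by
            refine hiff.mpr ⟨by omega, fun t ht => ?_⟩
            have h1 : i - t = i + 1 - (t + 1) := by omega
            rw [h1]
            exact hall (t + 1) (by omega)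
          push_cast at this ⊢; omega
    · simp only [Bool.not_eq_true] at hg
      rw [if_neg (by rw [hg]; simp)]
      constructor
      · intro h; omega
      · rintro ⟨h1, h2⟩
        have := h2 0 (by omega)
        simp only [Nat.sub_zero] at this
        rw [hg] at this
        exact absurd this (by simp)

lemma pvBorderBRb_iff (a : List (List String)) (i j c : Nat) (hc1 : 1 ≤ c) :
    pvBorderBRb a i j c = true ↔
      ((c : Int) ≤ pvTopV a i j ∧ (c : Int) ≤ pvLeftV a i j ∧
       (c : Int) ≤ pvLeftV a (i - (c - 1)) j ∧ (c : Int) ≤ pvTopV a i (j - (c - 1))) := by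
  unfold pvBorderBRb
  rw [pvTopV, pvLeftV, pvLeftV, pvTopV,
    pvRunF_ge _ _ _ hc1, pvRunF_ge _ _ _ hc1, pvRunF_ge _ _ _ hc1, pvRunF_ge _ _ _ hc1]
  simp only [Bool.and_eq_true, List.all_eq_true, List.mem_range, decide_eq_true_eq,
    Bool.and_eq_true]
  constructor
  · rintro ⟨⟨hbi, hbj⟩, hall⟩
    exact ⟨⟨hbi, fun t ht => (hall t ht).1.1.1⟩, ⟨hbj, fun t ht => (hall t ht).1.1.2⟩,
      ⟨hbj, fun t ht => (hall t ht).1.2⟩, ⟨hbi, fun t ht => (hall t ht).2⟩⟩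
  · rintro ⟨⟨hbi, h1⟩, ⟨hbj, h2⟩, ⟨_, h3⟩, ⟨_, h4⟩⟩
    exact ⟨⟨hbi, hbj⟩, fun t ht => ⟨⟨⟨h1 t ht, h2 t ht⟩, h3 t ht⟩, h4 t ht⟩⟩

lemma pvWhile_eq (a : List (List String)) (n' i j : Nat) (hi : i < n') (hj : j < n')
    (acc : Int) (hacc : 0 ≤ acc) (c : Nat)
    (hc : (c : Int) ≤ min (pvTopV a i j) (pvLeftV a i j)) :
    pvWhile (pvTblM (pvTopV a) n') (pvTblM (fun p q => pvLeftV a p q) n')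
        (i : Int) (j : Int) acc (c : Int)
      = max acc (pvGbr a i j c) := by
  induction c with
  | zero =>
    unfold pvWhile
    rw [if_neg (by omega)]
    simp only [pvGbr]
    exact (max_eq_left hacc).symm
  | succ c ih =>
    have htop : ((c + 1 : Nat) : Int) ≤ pvTopV a i j := le_trans hc (min_le_left _ _)
    have hleft : ((c + 1 : Nat) : Int) ≤ pvLeftV a i j := le_trans hc (min_le_right _ _)
    have hbi : c + 1 ≤ i + 1 := ((pvRunF_ge _ _ _ (by omega)).mp htop).1
    have hbj : c + 1 ≤ j + 1 := ((pvRunF_ge _ _ _ (by omega)).mp hleft).1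
    have e1 : (i : Int) - ((c + 1 : Nat) : Int) + 1 = ((i - c : Nat) : Int) := by push_cast; omega
    have e2 : (j : Int) - ((c + 1 : Nat) : Int) + 1 = ((j - c : Nat) : Int) := by push_cast; omega
    have hbiff := pvBorderBRb_iff a i j (c + 1) (by omega)
    have hc1 : (c + 1) - 1 = c := by omega
    rw [hc1] at hbiff
    unfold pvWhile
    rw [if_pos (by push_cast; omega : (0 : Int) < ((c + 1 : Nat) : Int)), e1, e2,
      pvTblM_get _ n' (i - c) j (by omega) hj, pvTblM_get _ n' i (j - c) hi (by omega)]
    by_cases hb : pvBorderBRb a i j (c + 1) = true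
    · have hcond := hbiff.mp hb
      rw [if_pos ⟨hcond.2.2.1, hcond.2.2.2⟩]
      simp only [pvGbr, hb, if_true]
      push_cast; rfl
    · rw [if_neg (fun hcond => hb (hbiff.mpr ⟨htop, hleft, hcond.1, hcond.2⟩))]
      have e3 : ((c + 1 : Nat) : Int) - 1 = ((c : Nat) : Int) := by push_cast; ring
      rw [e3, ih (le_trans (by push_cast; omega) hc)]
      simp [pvGbr, hb]

lemma pvRunF_pos (g : Nat → Bool) (i : Nat) (h : g i = true) : 1 ≤ pvRunF g i := by
  cases i with
  | zero => simp [pvRunF, h]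
  | succ m => have := pvRunF_nonneg g m; simp [pvRunF, h]; omega

lemma pvBorderBRb_bounds (a : List (List String)) (i j k : Nat)
    (hb : pvBorderBRb a i j k = true) : k ≤ i + 1 ∧ k ≤ j + 1 := by
  unfold pvBorderBRb at hb
  simp only [Bool.and_eq_true, decide_eq_true_eq] at hb
  exact ⟨hb.1.1, hb.1.2⟩

lemma pvBorderBRb_Xb (a : List (List String)) (i j k : Nat) (hk : 1 ≤ k)
    (hb : pvBorderBRb a i j k = true) : pvXb a i j = true := by
  unfold pvBorderBRb at hb
  simp only [Bool.and_eq_true, decide_eq_true_eq, List.all_eq_true, List.mem_range] at hb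
  have := hb.2 0 (by omega)
  simpa using this.1.1.1

lemma pvGbr_eq_zero (a : List (List String)) (i j : Nat) (hx : pvXb a i j = false) (c : Nat) :
    pvGbr a i j c = 0 := by
  induction c with
  | zero => rfl
  | succ c ih =>
    unfold pvGbr
    rw [if_neg (fun hb => by rw [pvBorderBRb_Xb a i j (c + 1) (by omega) hb] at hx; cases hx), ih]

lemma pvGbr_cases (a : List (List String)) (i j c : Nat) :
    pvGbr a i j c = 0 ∨
      ∃ k : Nat, pvGbr a i j c = (k : Int) ∧ 1 ≤ k ∧ k ≤ c ∧ pvBorderBRb a i j k = true := by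
  induction c with
  | zero => left; rfl
  | succ c ih =>
    unfold pvGbr
    by_cases hb : pvBorderBRb a i j (c + 1) = true
    · right; exact ⟨c + 1, by rw [if_pos hb]; push_cast; ring, by omega, le_refl _, hb⟩
    · rw [if_neg hb]
      rcases ih with h | ⟨k, h1, h2, h3, h4⟩
      · left; exact h
      · right; exact ⟨k, h1, h2, by omega, h4⟩

lemma pvGbr_ge (a : List (List String)) (i j k : Nat) (hk : 1 ≤ k)
    (hb : pvBorderBRb a i j k = true) :
    ∀ c, k ≤ c → (k : Int) ≤ pvGbr a i j c := by
  intro c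
  induction c with
  | zero => intro hkc; omega
  | succ c ih =>
    intro hkc
    unfold pvGbr
    by_cases hbc : pvBorderBRb a i j (c + 1) = true
    · rw [if_pos hbc]; push_cast; omega
    · rw [if_neg hbc]
      rcases Nat.lt_or_ge k (c + 1) with h | h
      · exact ih (by omega)
      · have hkeq : k = c + 1 := by omega
        exact absurd (hkeq ▸ hb) hbc

lemma pvBestK_nonneg (a : List (List String)) (n' k : Nat) : 0 ≤ pvBestK a n' k := by
  induction k with
  | zero => simp [pvBestK]
  | succ k ih => unfold pvBestK; split_ifs <;> [positivity; exact ih]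

lemma pvBestK_cases (a : List (List String)) (n' c : Nat) :
    pvBestK a n' c = 0 ∨
      ∃ k : Nat, pvBestK a n' c = (k : Int) ∧ 1 ≤ k ∧ k ≤ c ∧ pvOkK a n' k = true := by
  induction c with
  | zero => left; rfl
  | succ c ih =>
    unfold pvBestK
    by_cases hb : pvOkK a n' (c + 1) = true
    · right; exact ⟨c + 1, by rw [if_pos hb]; push_cast; ring, by omega, le_refl _, hb⟩
    · rw [if_neg hb]
      rcases ih with h | ⟨k, h1, h2, h3, h4⟩
      · left; exact h
      · right; exact ⟨k, h1, h2, by omega, h4⟩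

lemma pvLe_bestK (a : List (List String)) (n' k : Nat) (hk : 1 ≤ k)
    (hb : pvOkK a n' k = true) :
    ∀ c, k ≤ c → (k : Int) ≤ pvBestK a n' c := by
  intro c
  induction c with
  | zero => intro hkc; omega
  | succ c ih =>
    intro hkc
    unfold pvBestK
    by_cases hbc : pvOkK a n' (c + 1) = true
    · rw [if_pos hbc]; push_cast; omega
    · rw [if_neg hbc]
      rcases Nat.lt_or_ge k (c + 1) with h | h
      · exact ih (by omega)
      · have hkeq : k = c + 1 := by omega
        exact absurd (hkeq ▸ hb) hbc

lemma pvBR_iff_TL (a : List (List String)) (i j k : Nat) (h1 : 1 ≤ k)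
    (hik : k ≤ i + 1) (hjk : k ≤ j + 1) :
    pvBorderBRb a i j k = true ↔ pvBorderTLb a (i + 1 - k) (j + 1 - k) k = true := by
  unfold pvBorderBRb pvBorderTLb
  simp only [Bool.and_eq_true, decide_eq_true_eq, List.all_eq_true, List.mem_range]
  constructor
  · rintro ⟨-, hall⟩
    refine ⟨⟨⟨fun t ht => ?_, fun t ht => ?_⟩, fun t ht => ?_⟩, fun t ht => ?_⟩
    · have h := (hall (k - 1 - t) (by omega)).1.2
      have e1 : i + 1 - k = i - (k - 1) := by omega
      have e2 : j + 1 - k + t = j - (k - 1 - t) := by omega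
      rw [e1, e2]; exact h
    · have h := (hall (k - 1 - t) (by omega)).1.1.2
      have e1 : i + 1 - k + k - 1 = i := by omega
      have e2 : j + 1 - k + t = j - (k - 1 - t) := by omega
      rw [e1, e2]; exact h
    · have h := (hall (k - 1 - t) (by omega)).2
      have e1 : i + 1 - k + t = i - (k - 1 - t) := by omega
      have e2 : j + 1 - k = j - (k - 1) := by omega
      rw [e1, e2]; exact h
    · have h := (hall (k - 1 - t) (by omega)).1.1.1
      have e1 : i + 1 - k + t = i - (k - 1 - t) := by omega
      have e2 : j + 1 - k + k - 1 = j := by omega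
      rw [e1, e2]; exact h
  · rintro ⟨⟨⟨hTL1, hTL2⟩, hTL3⟩, hTL4⟩
    refine ⟨⟨hik, hjk⟩, fun t ht => ⟨⟨⟨?_, ?_⟩, ?_⟩, ?_⟩⟩
    · have h := hTL4 (k - 1 - t) (by omega)
      have e1 : i + 1 - k + (k - 1 - t) = i - t := by omega
      have e2 : j + 1 - k + k - 1 = j := by omega
      rw [e1, e2] at h; exact h
    · have h := hTL2 (k - 1 - t) (by omega)
      have e1 : i + 1 - k + k - 1 = i := by omega
      have e2 : j + 1 - k + (k - 1 - t) = j - t := by omega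
      rw [e1, e2] at h; exact h
    · have h := hTL1 (k - 1 - t) (by omega)
      have e1 : i + 1 - k = i - (k - 1) := by omega
      have e2 : j + 1 - k + (k - 1 - t) = j - t := by omega
      rw [e1, e2] at h; exact h
    · have h := hTL3 (k - 1 - t) (by omega)
      have e1 : i + 1 - k + (k - 1 - t) = i - t := by omega
      have e2 : j + 1 - k = j - (k - 1) := by omega
      rw [e1, e2] at h; exact h

lemma pvFoldl_inv {α : Type} (l : List α) (step : Int → α → Int) (P : Int → Prop)
    (init : Int) (hstep : ∀ acc t, t ∈ l → P acc → P (step acc t)) (hinit : P init) :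
    P (l.foldl step init) := by
  induction l generalizing init with
  | nil => exact hinit
  | cons hd tl ih =>
    exact ih (step init hd) (fun acc t ht hP => hstep acc t (List.mem_cons_of_mem _ ht) hP)
      (hstep init hd (List.mem_cons_self) hinit)

lemma pvLe_foldl_inv {α : Type} (l : List α) (step : Int → α → Int) (P : Int → Prop)
    (init : Int) (hstep : ∀ acc t, t ∈ l → P acc → P (step acc t)) (hinit : P init)
    (hmono : ∀ acc t, t ∈ l → P acc → acc ≤ step acc t) :
    init ≤ l.foldl step init := by
  induction l generalizing init with
  | nil => exact le_refl _
  | cons hd tl ih =>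
    refine le_trans (hmono init hd (List.mem_cons_self) hinit) ?_
    exact ih (step init hd) (fun acc t ht hP => hstep acc t (List.mem_cons_of_mem _ ht) hP)
      (hstep init hd (List.mem_cons_self) hinit)
      (fun acc t ht hP => hmono acc t (List.mem_cons_of_mem _ ht) hP)

lemma pvLe_foldl_of_mem {α : Type} (step : Int → α → Int) (P : Int → Prop) (t : α)
    (v : Int) (hv : ∀ acc, P acc → v ≤ step acc t) :
    ∀ (l : List α) (init : Int),
      (∀ acc s, s ∈ l → P acc → P (step acc s)) →
      (∀ acc s, s ∈ l → P acc → acc ≤ step acc s) →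
      P init → t ∈ l → v ≤ l.foldl step init := by
  intro l
  induction l with
  | nil => intro init _ _ _ ht; cases ht
  | cons hd tl ih =>
    intro init hstep hmono hinit ht
    rcases List.mem_cons.mp ht with rfl | htl
    · refine le_trans (hv init hinit) ?_
      exact pvLe_foldl_inv tl step P (step init t)
        (fun acc s hs hP => hstep acc s (List.mem_cons_of_mem _ hs) hP)
        (hstep init t List.mem_cons_self hinit)
        (fun acc s hs hP => hmono acc s (List.mem_cons_of_mem _ hs) hP)
    · exact ih (step init hd)
        (fun acc s hs hP => hstep acc s (List.mem_cons_of_mem _ hs) hP)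
        (fun acc s hs hP => hmono acc s (List.mem_cons_of_mem _ hs) hP)
        (hstep init hd List.mem_cons_self hinit) htl

lemma pvWhile_ge_acc (T L : List (List Int)) (i j acc c : Int) :
    acc ≤ pvWhile T L i j acc c := by
  have H : ∀ (m : Nat) (c : Int), c.toNat ≤ m → acc ≤ pvWhile T L i j acc c := by
    intro m
    induction m with
    | zero =>
      intro c hc
      unfold pvWhile
      rw [if_neg (by omega : ¬(0 : Int) < c)]
    | succ m ih =>
      intro c hc
      unfold pvWhile
      split_ifs with h1 h2
      · exact le_max_left _ _
      · exact ih (c - 1) (by omega)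
      · exact le_refl _
  exact H c.toNat c (le_refl _)

def pvCellG (a : List (List String)) (i j : Nat) : Int :=
  pvGbr a i j (min (pvTopV a i j) (pvLeftV a i j)).toNat

lemma pvCellStep (a : List (List String)) (n' i j : Nat) (hi : i < n') (hj : j < n')
    (acc : Int) (hacc : 0 ≤ acc) :
    (if pvMget (pvTblM (pvTopV a) n') (i : Int) (j : Int) = 0 ∨
        pvMget (pvTblM (fun i j => pvLeftV a i j) n') (i : Int) (j : Int) = 0 then acc
     else pvWhile (pvTblM (pvTopV a) n') (pvTblM (fun i j => pvLeftV a i j) n')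
        (i : Int) (j : Int) acc
        (min (pvMget (pvTblM (pvTopV a) n') (i : Int) (j : Int))
             (pvMget (pvTblM (fun i j => pvLeftV a i j) n') (i : Int) (j : Int))))
      = max acc (pvCellG a i j) := by
  rw [pvTblM_get _ n' i j hi hj, pvTblM_get _ n' i j hi hj]
  by_cases h0 : pvTopV a i j = 0 ∨ pvLeftV a i j = 0
  · rw [if_pos h0]
    have hx : pvXb a i j = false := by
      by_contra hx
      have hx' : pvXb a i j = true := by simpa using hx
      have h1 := pvRunF_pos (fun r => pvXb a r j) i hx'
      have h2 := pvRunF_pos (fun c => pvXb a i c) j hx'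
      rcases h0 with h | h
      · rw [pvTopV] at h; omega
      · rw [pvLeftV] at h; omega
    rw [pvCellG, pvGbr_eq_zero a i j hx]
    exact (max_eq_left hacc).symm
  · rw [if_neg h0]
    have ht : (0 : Int) ≤ pvTopV a i j := pvRunF_nonneg _ i
    have hl : (0 : Int) ≤ pvLeftV a i j := pvRunF_nonneg _ j
    have hmin : (0 : Int) ≤ min (pvTopV a i j) (pvLeftV a i j) := le_min ht hl
    have hcast : (((min (pvTopV a i j) (pvLeftV a i j)).toNat : Nat) : Int)
        = min (pvTopV a i j) (pvLeftV a i j) := Int.toNat_of_nonneg hmin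
    rw [pvCellG, ← hcast]
    exact pvWhile_eq a n' i j hi hj acc hacc _ (le_of_eq hcast)

lemma pvCellG_le (a : List (List String)) (n' i j : Nat) (hi : i < n') (hj : j < n') :
    pvCellG a i j ≤ pvBestK a n' n' := by
  rcases pvGbr_cases a i j ((min (pvTopV a i j) (pvLeftV a i j)).toNat) with h | ⟨k, h1, h2, h3, h4⟩
  · rw [pvCellG, h]; exact pvBestK_nonneg a n' n'
  · rw [pvCellG, h1]
    obtain ⟨hik, hjk⟩ := pvBorderBRb_bounds a i j k h4
    have hTL := (pvBR_iff_TL a i j k h2 hik hjk).mp h4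
    have hok : pvOkK a n' k = true := by
      rw [pvOkK]
      simp only [List.any_eq_true, List.mem_range]
      exact ⟨i + 1 - k, by omega, j + 1 - k, by omega, hTL⟩
    exact pvLe_bestK a n' k h2 hok n' (by omega)

lemma pvA_eq (n : Int) (a : List (List String)) :
    largestSubsquare n a = pvBestK a n.toNat n.toNat := by
  have hzero := pvBestK_nonneg a n.toNat n.toNat
  simp only [largestSubsquare]
  rw [pvTopTable, pvLeftTable, PySem.List.pyRange_zero]
  apply le_antisymm
  · refine (pvFoldl_inv _ _ (fun acc => 0 ≤ acc ∧ acc ≤ pvBestK a n.toNat n.toNat) 0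
      ?_ ⟨le_refl 0, hzero⟩).2
    intro acc t ht hP
    obtain ⟨i', hi'mem, rfl⟩ := List.mem_map.mp ht
    have hi' : i' < n.toNat := List.mem_range.mp hi'mem
    refine pvFoldl_inv _ _ (fun acc => 0 ≤ acc ∧ acc ≤ pvBestK a n.toNat n.toNat) acc ?_ hP
    intro acc2 t2 ht2 hP2
    obtain ⟨j', hj'mem, rfl⟩ := List.mem_map.mp ht2
    have hj' : j' < n.toNat := List.mem_range.mp hj'mem
    rw [pvCellStep a n.toNat i' j' hi' hj' acc2 hP2.1]
    exact ⟨le_trans hP2.1 (le_max_left _ _),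
      max_le hP2.2 (pvCellG_le a n.toNat i' j' hi' hj')⟩
  · rcases pvBestK_cases a n.toNat n.toNat with h | ⟨k, h1, h2, h3, h4⟩
    · rw [h]
      refine pvFoldl_inv _ _ (fun acc => 0 ≤ acc) 0 ?_ (le_refl 0)
      intro acc t ht hP
      refine pvFoldl_inv _ _ (fun acc => 0 ≤ acc) acc ?_ hP
      intro acc2 t2 ht2 hP2
      split_ifs with hc
      · exact hP2
      · exact le_trans hP2 (pvWhile_ge_acc _ _ _ _ _ _)
    · rw [h1]
      rw [pvOkK] at h4
      simp only [List.any_eq_true, List.mem_range] at h4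
      obtain ⟨p, hp, q, hq, hTL⟩ := h4
      have hi' : p + k - 1 < n.toNat := by omega
      have hj' : q + k - 1 < n.toNat := by omega
      have hBR : pvBorderBRb a (p + k - 1) (q + k - 1) k = true := by
        rw [pvBR_iff_TL a (p + k - 1) (q + k - 1) k h2 (by omega) (by omega)]
        have e1 : p + k - 1 + 1 - k = p := by omega
        have e2 : q + k - 1 + 1 - k = q := by omega
        rw [e1, e2]; exact hTL
      have hmin : k ≤ (min (pvTopV a (p + k - 1) (q + k - 1))
          (pvLeftV a (p + k - 1) (q + k - 1))).toNat := by
        have hch := (pvBorderBRb_iff a (p + k - 1) (q + k - 1) k h2).mp hBR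
        have hm : (k : Int) ≤ min (pvTopV a (p + k - 1) (q + k - 1))
            (pvLeftV a (p + k - 1) (q + k - 1)) := le_min hch.1 hch.2.1
        omega
      have hcell : (k : Int) ≤ pvCellG a (p + k - 1) (q + k - 1) := by
        rw [pvCellG]
        exact pvGbr_ge a (p + k - 1) (q + k - 1) k h2 hBR _ hmin
      refine pvLe_foldl_of_mem _ (fun acc => 0 ≤ acc) ((p + k - 1 : Nat) : Int) _ ?_ _ 0
        ?_ ?_ (le_refl 0) ?_
      · intro acc hacc
        refine pvLe_foldl_of_mem _ (fun acc => 0 ≤ acc) ((q + k - 1 : Nat) : Int) _ ?_ _ acc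
          ?_ ?_ hacc ?_
        · intro acc2 hacc2
          rw [pvCellStep a n.toNat (p + k - 1) (q + k - 1) hi' hj' acc2 hacc2]
          exact le_trans hcell (le_max_right _ _)
        · intro acc2 s hs hP
          split_ifs with hc
          · exact hP
          · exact le_trans hP (pvWhile_ge_acc _ _ _ _ _ _)
        · intro acc2 s hs hP
          split_ifs with hc
          · exact le_refl _
          · exact pvWhile_ge_acc _ _ _ _ _ _
        · exact List.mem_map.mpr ⟨q + k - 1, List.mem_range.mpr hj', rfl⟩
      · intro acc s hs hP
        refine pvFoldl_inv _ _ (fun acc => 0 ≤ acc) acc ?_ hP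
        intro acc2 t2 ht2 hP2
        split_ifs with hc
        · exact hP2
        · exact le_trans hP2 (pvWhile_ge_acc _ _ _ _ _ _)
      · intro acc s hs hP
        refine pvLe_foldl_inv _ _ (fun acc => 0 ≤ acc) acc ?_ hP ?_
        · intro acc2 t2 ht2 hP2
          split_ifs with hc
          · exact hP2
          · exact le_trans hP2 (pvWhile_ge_acc _ _ _ _ _ _)
        · intro acc2 t2 ht2 hP2
          split_ifs with hc
          · exact le_refl _
          · exact pvWhile_ge_acc _ _ _ _ _ _
      · exact List.mem_map.mpr ⟨p + k - 1, List.mem_range.mpr hi', rfl⟩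

lemma pvBorderOk_eq (a : List (List String)) (p q k : Nat) (hk : 1 ≤ k) :
    pvBorderOk a (p : Int) (q : Int) (k : Int) = pvBorderTLb a p q k := by
  unfold pvBorderOk pvBorderTLb
  rw [PySem.List.pyRange_zero]
  simp only [Int.toNat_natCast, List.all_map]
  have e1 : (p : Int) + (k : Int) - 1 = ((p + k - 1 : Nat) : Int) := by push_cast; omega
  have e2 : (q : Int) + (k : Int) - 1 = ((q + k - 1 : Nat) : Int) := by push_cast; omega
  rw [e1, e2]
  congr 1
  · congr 1
    · congr 1
      · congr 1
        funext t
        simp only [Function.comp_apply]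
        rw [show (q : Int) + (t : Nat) = ((q + t : Nat) : Int) by push_cast; ring,
          pvCell_natCast]
        rw [Bool.eq_iff_iff]
        simp [pvXb]
      · congr 1
        funext t
        simp only [Function.comp_apply]
        rw [show (q : Int) + (t : Nat) = ((q + t : Nat) : Int) by push_cast; ring,
          pvCell_natCast]
        rw [Bool.eq_iff_iff]
        simp [pvXb]
    · congr 1
      funext t
      simp only [Function.comp_apply]
      rw [show (p : Int) + (t : Nat) = ((p + t : Nat) : Int) by push_cast; ring,
        pvCell_natCast]
      rw [Bool.eq_iff_iff]
      simp [pvXb]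
  · congr 1
    funext t
    simp only [Function.comp_apply]
    rw [show (p : Int) + (t : Nat) = ((p + t : Nat) : Int) by push_cast; ring,
      pvCell_natCast]
    rw [Bool.eq_iff_iff]
    simp [pvXb]

lemma pvSearch_eq (a : List (List String)) (n' : Nat) :
    ∀ k : Nat, k ≤ n' →
      pvSearch ((n' : Nat) : Int) a (PySem.List.pyRange ((k : Nat) : Int) 0 (-1))
        = pvBestK a n' k := by
  intro k
  induction k with
  | zero =>
    intro _
    rw [PySem.List.pyRange_neg_one_eq_nil (by omega)]
    rfl
  | succ k ih =>
    intro hk1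
    rw [PySem.List.pyRange_neg_one_cons (by push_cast; omega : (0 : Int) < ((k + 1 : Nat) : Int))]
    unfold pvSearch
    have e0 : ((n' : Nat) : Int) - ((k + 1 : Nat) : Int) + 1 = ((n' + 1 - (k + 1) : Nat) : Int) := by
      push_cast; omega
    have hany :
        ((PySem.List.pyRange 0 (((n' : Nat) : Int) - ((k + 1 : Nat) : Int) + 1)).any
          (fun i => (PySem.List.pyRange 0 (((n' : Nat) : Int) - ((k + 1 : Nat) : Int) + 1)).any
            (fun j => pvBorderOk a i j ((k + 1 : Nat) : Int))))
          = pvOkK a n' (k + 1) := by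
      rw [e0, PySem.List.pyRange_zero, pvOkK]
      simp only [Int.toNat_natCast, List.any_map]
      congr 1
      funext p
      simp only [Function.comp_apply]
      congr 1
      funext q
      simp only [Function.comp_apply]
      exact pvBorderOk_eq a p q (k + 1) (by omega)
    rw [hany]
    by_cases hb : pvOkK a n' (k + 1) = true
    · rw [if_pos hb]
      unfold pvBestK
      rw [if_pos hb]
      push_cast; ring
    · rw [if_neg hb]
      have e3 : ((k + 1 : Nat) : Int) - 1 = ((k : Nat) : Int) := by push_cast; ring
      rw [e3, ih (by omega)]
      conv_rhs => rw [pvBestK]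
      rw [if_neg hb]

lemma pvB_eq (n : Int) (a : List (List String)) :
    largestSubsquare_alt n a = pvBestK a n.toNat n.toNat := by
  unfold largestSubsquare_alt
  by_cases h : n ≤ 0
  · rw [PySem.List.pyRange_neg_one_eq_nil h]
    have h0 : n.toNat = 0 := by omega
    rw [h0]
    rfl
  · have hn : n = ((n.toNat : Nat) : Int) := by omega
    rw [hn]
    exact pvSearch_eq a n.toNat n.toNat (le_refl _)

-- ===== VERDICT (by name: the statement is the Claim_ definition above) =====
theorem largestSubsquare_spec : Claim_equal_largestSubsquare := by
  intro n a _ _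
  unfold Spec_largestSubsquare
  rw [pvA_eq, pvB_eq]
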